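-- pv_equiv track=rewrite | github.com/kgrajski/trading_etf | src/workflow/pipeline/02b-etf-retrospective.py | compute_sponsor_trends
-- ===== SOURCE A (Python) =====
-- from collections import Counter, defaultdict
-- from typing import Any, Dict, List, Optional, Set, Tuple
--
-- def compute_sponsor_trends(
--     quarterly: Dict[str, List[Dict[str, Any]]]
-- ) -> Dict[str, Dict[str, int]]:
--     """Compute sponsor trends by year.
--
--     Args:
--         quarterly: Quarterly ETF breakdown
--
--     Returns:
--         Dict mapping sponsor to {year: count}
--     """
--     yearly_sponsors: Dict[str, Counter] = defaultdict(Counter)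
--
--     for quarter, etfs in quarterly.items():
--         year = quarter.split("-")[0]
--         for etf in etfs:
--             sponsor = etf["sponsor"]
--             yearly_sponsors[sponsor][year] += 1
--
--     return {sponsor: dict(counts) for sponsor, counts in yearly_sponsors.items()}
-- ===== SOURCE B (Python) =====
-- def compute_sponsor_trends(quarterly):
--     """Compute sponsor trends by year.
--
--     Alternative decomposition: flatten to (sponsor, year) pairs once, then
--     group by sponsor with a per-sponsor counting pass.
--     """
--     pairs = [(etf["sponsor"], quarter.split("-")[0])
--              for quarter, etfs in quarterly.items() for etf in etfs]
--     result = {}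
--     for sponsor in dict.fromkeys(s for s, _ in pairs):
--         counts = {}
--         for s, year in pairs:
--             if s == sponsor:
--                 counts[year] = counts.get(year, 0) + 1
--         result[sponsor] = counts
--     return result
-- ===== Notes on version B (the rewrite author's own statement) =====
-- stated objective: alternative
-- what changed: Instead of accumulating directly into a nested dict-of-counters in one nested loop, B first flattens the input into a flat list of (sponsor, year) pairs, then groups by sponsor: for each distinct sponsor (in first-appearance order) it runs a separate counting pass over the flat pairs to build that sponsor's year counts.
import Mathlib
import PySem

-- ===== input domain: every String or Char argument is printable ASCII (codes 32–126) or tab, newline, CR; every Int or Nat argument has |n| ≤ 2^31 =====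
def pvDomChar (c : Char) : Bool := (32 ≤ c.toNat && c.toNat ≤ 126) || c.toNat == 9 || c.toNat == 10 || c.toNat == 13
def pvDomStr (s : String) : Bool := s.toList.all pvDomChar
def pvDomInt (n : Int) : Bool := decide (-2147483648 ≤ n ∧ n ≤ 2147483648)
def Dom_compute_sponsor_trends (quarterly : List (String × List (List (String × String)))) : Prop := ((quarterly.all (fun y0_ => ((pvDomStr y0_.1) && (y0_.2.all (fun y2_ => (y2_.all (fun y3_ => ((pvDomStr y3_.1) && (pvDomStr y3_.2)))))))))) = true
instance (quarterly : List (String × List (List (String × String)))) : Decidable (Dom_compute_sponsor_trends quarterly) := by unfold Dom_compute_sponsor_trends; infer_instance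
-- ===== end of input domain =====

-- B replaces A's single nested accumulation into a dict-of-counters by a flatten-then-group-by-sponsor
-- decomposition (alternative structure, same results); equal return values proved on Pre_ (every etf has a "sponsor" key).

-- ===== PORT A =====
-- A: for quarter, etfs; year = quarter.split("-")[0] (split with the nonempty separator "-" is
-- never empty, so [0] is the head); yearly[sponsor][year] += 1 via defaultdict(Counter); then
-- {sponsor: dict(counts) …} rebuilt as a dict comprehension. etf["sponsor"] is a first-match lookup;
-- Pre_ excludes the KeyError case (missing "sponsor"), where getD's default is unreachable.
def compute_sponsor_trends (quarterly : List (String × List (List (String × String)))) : List (String × List (String × Int)) :=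
  let yearly : PySem.Dict String (PySem.Dict String Int) :=
    quarterly.foldl (fun ys qe =>
      let year := ((PySem.Str.split? qe.1 "-").getD []).headD ""
      qe.2.foldl (fun ys etf =>
        let sponsor := PySem.Dict.getD (PySem.Dict.mk etf) "sponsor" ""
        PySem.Dict.insert ys sponsor
          (PySem.Dict.insert (PySem.Dict.getD ys sponsor PySem.Dict.empty) year
            (PySem.Dict.getD (PySem.Dict.getD ys sponsor PySem.Dict.empty) year 0 + 1))) ys)
      PySem.Dict.empty
  (yearly.items.foldl (fun r p => PySem.Dict.insert r p.1 p.2.items) PySem.Dict.empty).items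

-- ===== PORT B =====
-- B: flatten to (sponsor, year) pairs; dict.fromkeys ordered dedup of sponsors (PySem.List.dedup);
-- per sponsor, one counting pass over the flat pairs.
def compute_sponsor_trends_alt (quarterly : List (String × List (List (String × String)))) : List (String × List (String × Int)) :=
  let pairs : List (String × String) :=
    quarterly.flatMap (fun qe =>
      qe.2.map (fun etf =>
        (PySem.Dict.getD (PySem.Dict.mk etf) "sponsor" "", ((PySem.Str.split? qe.1 "-").getD []).headD "")))
  let sponsors := PySem.List.dedup (pairs.map Prod.fst)
  (sponsors.foldl (fun r sponsor =>
      let counts : PySem.Dict String Int :=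
        pairs.foldl (fun c p =>
          if p.1 == sponsor then PySem.Dict.insert c p.2 (PySem.Dict.getD c p.2 0 + 1) else c)
          PySem.Dict.empty
      PySem.Dict.insert r sponsor counts.items) PySem.Dict.empty).items

-- ===== PRECONDITION & SPEC =====
-- Pre_: every etf dict contains the key "sponsor"; on any other input the Python A raises KeyError
-- (and so does B).
def Pre_compute_sponsor_trends (quarterly : List (String × List (List (String × String)))) : Prop :=
  ∀ qe ∈ quarterly, ∀ etf ∈ qe.2, (PySem.Dict.mk etf).contains "sponsor" = true
instance (quarterly : List (String × List (List (String × String)))) : Decidable (Pre_compute_sponsor_trends quarterly) := by unfold Pre_compute_sponsor_trends; infer_instance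
def pvWitness_compute_sponsor_trends : (List (String × List (List (String × String)))) :=
  [("2023-Q1", [[("sponsor", "X")], [("sponsor", "Y")]]), ("2024-Q1", [[("sponsor", "X")]])]

def Spec_compute_sponsor_trends (quarterly : List (String × List (List (String × String)))) (out : List (String × List (String × Int))) : Prop := out = compute_sponsor_trends_alt quarterly
instance (quarterly : List (String × List (List (String × String)))) (out : List (String × List (String × Int))) : Decidable (Spec_compute_sponsor_trends quarterly out) := by unfold Spec_compute_sponsor_trends; infer_instance

-- ===== CLAIM (what is proved, stated in full; the proofs are below) =====
def Claim_equal_compute_sponsor_trends : Prop := ∀ (quarterly : List (String × List (List (String × String)))), Dom_compute_sponsor_trends quarterly → Pre_compute_sponsor_trends quarterly → Spec_compute_sponsor_trends quarterly (compute_sponsor_trends quarterly)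

-- ===== LEMMAS AND PROOFS =====

-- the flat pairs list both characterizations speak about
def pvPairs (quarterly : List (String × List (List (String × String)))) : List (String × String) :=
  quarterly.flatMap (fun qe =>
    qe.2.map (fun etf =>
      (PySem.Dict.getD (PySem.Dict.mk etf) "sponsor" "", ((PySem.Str.split? qe.1 "-").getD []).headD "")))

-- A's inner accumulation step, per flat pair
def pvStepA (ys : PySem.Dict String (PySem.Dict String Int)) (p : String × String) :
    PySem.Dict String (PySem.Dict String Int) :=
  PySem.Dict.insert ys p.1
    (PySem.Dict.insert (PySem.Dict.getD ys p.1 PySem.Dict.empty) p.2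
      (PySem.Dict.getD (PySem.Dict.getD ys p.1 PySem.Dict.empty) p.2 0 + 1))

-- A's nested loop is the fold of pvStepA over the flattened pairs
lemma pvA_flatten (quarterly : List (String × List (List (String × String))))
    (d : PySem.Dict String (PySem.Dict String Int)) :
    quarterly.foldl (fun ys qe =>
      qe.2.foldl (fun ys etf =>
        pvStepA ys (PySem.Dict.getD (PySem.Dict.mk etf) "sponsor" "",
                    ((PySem.Str.split? qe.1 "-").getD []).headD "")) ys) d
    = (pvPairs quarterly).foldl pvStepA d := by
  induction quarterly generalizing d with
  | nil => rfl
  | cons qe rest ih =>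
      simp only [List.foldl_cons, pvPairs, List.flatMap_cons, List.foldl_append, List.foldl_map]
      rw [ih]
      rfl

-- value characterization: the counter stored at sponsor s is the fold of the year-count step
-- over the years of s's pairs
lemma pvA_getD (pairs : List (String × String)) (d : PySem.Dict String (PySem.Dict String Int))
    (s : String) :
    PySem.Dict.getD (pairs.foldl pvStepA d) s PySem.Dict.empty
    = ((pairs.filter (fun p => p.1 == s)).map Prod.snd).foldl
        (fun c y => PySem.Dict.insert c y (PySem.Dict.getD c y 0 + 1))
        (PySem.Dict.getD d s PySem.Dict.empty) := by
  induction pairs generalizing d with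
  | nil => rfl
  | cons p rest ih =>
      by_cases h : p.1 = s
      · simp only [List.foldl_cons, List.filter_cons, h, BEq.rfl, if_true, List.map_cons,
          List.foldl_cons, ih, pvStepA, PySem.Dict.getD_insert_self]
      · have hb : (p.1 == s) = false := by simp [h]
        simp only [List.foldl_cons, List.filter_cons, hb, Bool.false_eq_true, if_false, ih,
          pvStepA, PySem.Dict.getD_insert_of_ne _ _ _ (Ne.symm h)]

-- B's per-sponsor counting pass, and A's stored counter at sponsor s (pvA_getD): same fold
def pvCounts (pairs : List (String × String)) (s : String) : PySem.Dict String Int :=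
  ((pairs.filter (fun p => p.1 == s)).map Prod.snd).foldl
    (fun c y => PySem.Dict.insert c y (PySem.Dict.getD c y 0 + 1)) PySem.Dict.empty

-- a fold inserting distinct fresh keys into an empty dict lists exactly those key-value pairs
lemma pvFreshMapItems {ν : Type} (ks : List String) (f : String → ν) (h : ks.Nodup) :
    (ks.foldl (fun r s => PySem.Dict.insert r s (f s)) PySem.Dict.empty).items
    = ks.map (fun s => (s, f s)) := by
  simpa using PySem.Dict.items_foldl_insert_fresh ks (fun s => s) f PySem.Dict.empty
    (fun a _ => PySem.Dict.contains_empty _) (by simpa using h)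

-- canonical form of A's result
lemma pvA_eq (q : List (String × List (List (String × String)))) :
    compute_sponsor_trends q
    = (PySem.List.dedup ((pvPairs q).map Prod.fst)).map
        (fun s => (s, (pvCounts (pvPairs q) s).items)) := by
  have hflat := pvA_flatten q PySem.Dict.empty
  simp only [pvStepA] at hflat
  simp only [compute_sponsor_trends]
  rw [hflat]
  have hnd : ((pvPairs q).foldl pvStepA PySem.Dict.empty).keys.Nodup :=
    PySem.Dict.nodup_keys_foldl_insert_key (pvPairs q) Prod.fst _ _ PySem.Dict.nodup_keys_empty
  have hkeys : ((pvPairs q).foldl pvStepA PySem.Dict.empty).keys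
      = PySem.List.dedup ((pvPairs q).map Prod.fst) := by
    rw [PySem.List.dedup_eq_ofList, PySem.Set.ofList_eq_foldl]
    exact PySem.Dict.keys_foldl_insert_key (pvPairs q) Prod.fst _ PySem.Dict.empty
  simp only [PySem.Dict.items_foldl_insert_fresh (((pvPairs q).foldl pvStepA PySem.Dict.empty).items)
        Prod.fst (fun p => p.2.items) PySem.Dict.empty
        (fun a _ => PySem.Dict.contains_empty _) (by simpa using hnd)]
  rw [PySem.Dict.items_eq_map_keys _ hnd PySem.Dict.empty, hkeys]
  simp only [show (PySem.Dict.empty : PySem.Dict String (List (String × Int))).items = [] from rfl,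
    List.nil_append, List.map_map]
  refine List.map_congr_left (fun s _ => ?_)
  simp only [Function.comp]
  rw [pvA_getD, pvCounts, PySem.Dict.getD_empty]

-- canonical form of B's result
lemma pvB_eq (q : List (String × List (List (String × String)))) :
    compute_sponsor_trends_alt q
    = (PySem.List.dedup ((pvPairs q).map Prod.fst)).map
        (fun s => (s, (pvCounts (pvPairs q) s).items)) := by
  show (List.foldl (fun r sponsor => PySem.Dict.insert r sponsor
      (List.foldl (fun c p => if p.1 == sponsor then
          PySem.Dict.insert c p.2 (PySem.Dict.getD c p.2 0 + 1) else c)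
        PySem.Dict.empty (pvPairs q)).items)
      PySem.Dict.empty (PySem.List.dedup ((pvPairs q).map Prod.fst))).items = _
  rw [pvFreshMapItems _ _ (PySem.List.nodup_dedup ((pvPairs q).map Prod.fst))]
  refine List.map_congr_left (fun s _ => ?_)
  congr 1
  rw [PySem.List.foldl_if_eq_foldl_filter, pvCounts, List.foldl_map]

-- ===== VERDICT (by name: the statement is the Claim_ definition above) =====
theorem compute_sponsor_trends_spec : Claim_equal_compute_sponsor_trends := by
  intro quarterly _ _
  unfold Spec_compute_sponsor_trends
  rw [pvA_eq, pvB_eq]
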